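-- pv_equiv track=rewrite | github.com/monsterworks-ludi/tabletop | src/hand_counter.py | build_decklist
-- ===== SOURCE A (Python) =====
-- def build_decklist(deck: dict[int, int]) -> list[tuple[int, int]]:
--     """
--
--     :parameter deck: a deck specification
--     :return: a list of cards in a deck specified by the deck specification
--     """
--
--     card_number = 0
--     decklist = []
--     for copies, cards in deck.items():
--         for card in range(cards):
--             for copy in range(copies):
--                 new_card = (card_number, copy)
--                 decklist.append(new_card)
--             card_number += 1
--     return decklist
-- ===== SOURCE B (Python) =====
-- def build_decklist(deck: dict[int, int]) -> list[tuple[int, int]]: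
--     counts = []
--     for copies, cards in deck.items():
--         counts.extend([copies] * cards)
--     return [(n, copy) for n, copies in enumerate(counts) for copy in range(copies)]
-- ===== Notes on version B (the rewrite author's own statement) =====
-- stated objective: alternative
-- what changed: Replaces A's single triple-nested loop with a running card_number accumulator by two phases: first a flat per-card copy-count table built with list repetition/extend, then a single enumerate-based comprehension emitting (card, copy) pairs.
import Mathlib
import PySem

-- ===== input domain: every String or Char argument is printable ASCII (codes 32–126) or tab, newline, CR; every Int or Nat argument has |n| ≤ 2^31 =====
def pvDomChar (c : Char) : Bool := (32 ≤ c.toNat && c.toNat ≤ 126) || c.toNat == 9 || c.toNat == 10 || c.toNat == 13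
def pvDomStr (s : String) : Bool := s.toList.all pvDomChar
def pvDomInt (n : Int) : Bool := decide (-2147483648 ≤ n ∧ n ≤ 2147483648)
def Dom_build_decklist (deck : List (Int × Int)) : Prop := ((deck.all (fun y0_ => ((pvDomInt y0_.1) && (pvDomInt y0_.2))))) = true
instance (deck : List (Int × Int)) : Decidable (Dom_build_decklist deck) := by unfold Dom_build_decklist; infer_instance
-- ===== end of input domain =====

-- B replaces A's triple-nested loop with a card_number accumulator by two phases:
-- build a flat copy-count table, then emit pairs from an enumerate comprehension.

-- ===== PORT A =====
-- A: card_number accumulator threaded through nested loops; appends one pair at a time.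
def build_decklist (deck : List (Int × Int)) : List (Int × Int) :=
  (deck.foldl
    (fun (st : Int × List (Int × Int)) cc =>
      -- for card in range(cards): (copy loop; then card_number += 1)
      (PySem.List.pyRange 0 cc.2 1).foldl
        (fun st2 _card =>
          (st2.1 + 1,
           (PySem.List.pyRange 0 cc.1 1).foldl
             (fun acc copy => acc ++ [(st2.1, copy)]) st2.2))
        st)
    (0, [])).2

-- ===== PORT B =====
-- B: counts table ([copies] * cards, extended), then one enumerate comprehension.
def build_decklist_alt (deck : List (Int × Int)) : List (Int × Int) :=
  let counts := deck.foldl (fun acc cc => acc ++ List.replicate cc.2.toNat cc.1) []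
  (PySem.List.enumerate counts 0).flatMap
    (fun nc => (PySem.List.pyRange 0 nc.2 1).map (fun copy => (nc.1, copy)))

-- ===== PRECONDITION & SPEC =====
def Spec_build_decklist (deck : List (Int × Int)) (out : List (Int × Int)) : Prop := out = build_decklist_alt deck
instance (deck : List (Int × Int)) (out : List (Int × Int)) : Decidable (Spec_build_decklist deck out) := by unfold Spec_build_decklist; infer_instance

-- ===== CLAIM (what is proved, stated in full; the proofs are below) =====
def Claim_equal_build_decklist : Prop := ∀ (deck : List (Int × Int)), Dom_build_decklist deck → Spec_build_decklist deck (build_decklist deck)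

-- ===== LEMMAS AND PROOFS =====

-- emission of a counts table starting at card index n
def pvEmit (n : Int) : List Int → List (Int × Int)
  | [] => []
  | c :: l => (PySem.List.pyRange 0 c 1).map (fun copy => (n, copy)) ++ pvEmit (n + 1) l

theorem pvEmit_append (l1 l2 : List Int) (n : Int) :
    pvEmit n (l1 ++ l2) = pvEmit n l1 ++ pvEmit (n + (l1.length : Int)) l2 := by
  induction l1 generalizing n with
  | nil => simp [pvEmit]
  | cons c l ih => simp [pvEmit, ih, List.append_assoc, add_assoc, add_comm (1 : Int)]

theorem pv_copyloop (m : Int) (c : Int) (dl : List (Int × Int)) :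
    (PySem.List.pyRange 0 c 1).foldl (fun acc copy => acc ++ [(m, copy)]) dl
      = dl ++ (PySem.List.pyRange 0 c 1).map (fun copy => (m, copy)) := by
  generalize PySem.List.pyRange 0 c 1 = L
  induction L generalizing dl with
  | nil => simp
  | cons x xs ih => simp [ih]

-- the card loop of A, over an arbitrary index list L, from state (n, dl)
theorem pv_cardloop (c : Int) (L : List Int) (n : Int) (dl : List (Int × Int)) :
    L.foldl (fun (st2 : Int × List (Int × Int)) _card =>
        (st2.1 + 1,
         (PySem.List.pyRange 0 c 1).foldl (fun acc copy => acc ++ [(st2.1, copy)]) st2.2)) (n, dl)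
      = (n + (L.length : Int), dl ++ pvEmit n (List.replicate L.length c)) := by
  have hFG : (fun (st2 : Int × List (Int × Int)) (_card : Int) =>
        (st2.1 + 1,
         (PySem.List.pyRange 0 c 1).foldl (fun acc copy => acc ++ [(st2.1, copy)]) st2.2))
      = (fun (st2 : Int × List (Int × Int)) (_card : Int) =>
        (st2.1 + 1, st2.2 ++ (PySem.List.pyRange 0 c 1).map (fun copy => (st2.1, copy)))) := by
    funext st2 _card
    rw [pv_copyloop]
  rw [hFG]
  induction L generalizing n dl with
  | nil => simp [pvEmit]
  | cons x xs ih =>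
    simp only [List.foldl_cons]
    rw [ih]
    simp only [List.length_cons, List.replicate_succ, pvEmit, Prod.ext_iff, List.append_assoc]
    constructor
    · push_cast; ring
    · trivial

theorem pv_countsfold (rest : List (Int × Int)) (acc : List Int) :
    rest.foldl (fun acc cc => acc ++ List.replicate cc.2.toNat cc.1) acc
      = acc ++ rest.foldl (fun acc cc => acc ++ List.replicate cc.2.toNat cc.1) [] := by
  induction rest generalizing acc with
  | nil => simp
  | cons y ys ihy =>
    simp only [List.foldl_cons, List.nil_append]
    rw [ihy, ihy (List.replicate y.2.toNat y.1), List.append_assoc]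

theorem pv_deckloop (deck : List (Int × Int)) (n : Int) (dl : List (Int × Int)) :
    (deck.foldl
      (fun (st : Int × List (Int × Int)) cc =>
        (PySem.List.pyRange 0 cc.2 1).foldl
          (fun st2 _card =>
            (st2.1 + 1,
             (PySem.List.pyRange 0 cc.1 1).foldl
               (fun acc copy => acc ++ [(st2.1, copy)]) st2.2))
          st)
      (n, dl)).2
    = dl ++ pvEmit n (deck.foldl (fun acc cc => acc ++ List.replicate cc.2.toNat cc.1) []) := by
  induction deck generalizing n dl with
  | nil => simp [pvEmit]
  | cons cc rest ih =>
    have hlen : (PySem.List.pyRange 0 cc.2 1).length = cc.2.toNat := by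
      simp [PySem.List.length_pyRange_one]
    simp only [List.foldl_cons, pv_cardloop, ih, hlen, List.nil_append]
    rw [pv_countsfold rest (List.replicate cc.2.toNat cc.1), pvEmit_append]
    simp only [List.length_replicate, List.append_assoc]

theorem pv_emit_eq_flatMap (counts : List Int) (s : Int) :
    (PySem.List.enumerate counts s).flatMap
        (fun nc => (PySem.List.pyRange 0 nc.2 1).map (fun copy => (nc.1, copy)))
      = pvEmit s counts := by
  induction counts generalizing s with
  | nil => simp [PySem.List.enumerate_nil, pvEmit]
  | cons c l ih => simp [PySem.List.enumerate_cons, pvEmit, ih]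

-- ===== VERDICT (by name: the statement is the Claim_ definition above) =====
theorem build_decklist_spec : Claim_equal_build_decklist := by
  intro deck _
  unfold Spec_build_decklist build_decklist build_decklist_alt
  rw [pv_deckloop, pv_emit_eq_flatMap]
  simp
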